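-- pv_equiv track=rewrite | github.com/KDigitalAi/Skill-Capital-AI-MockMate | app/services/coding_interview_engine.py | _get_question_types_asked
-- ===== SOURCE A (Python) =====
-- from typing import List, Dict, Optional, Any
--
-- def _get_question_types_asked(previous_questions: List[str]) -> Dict[str, bool]:
--     """✅ FIX: Analyze previous questions to determine which types have been asked"""
--     question_types = {
--         "array": False,
--         "string": False,
--         "oop": False,
--         "sql": False,
--         "api": False,
--         "debugging": False,
--         "logic": False,
--         "dsa_pattern": False,
--         "real_world": False
--     }
--
--     for q in previous_questions:
--         q_lower = q.lower()
--         if any(word in q_lower for word in ["array", "list", "index", "element"]):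
--             question_types["array"] = True
--         if any(word in q_lower for word in ["string", "substring", "character", "text"]):
--             question_types["string"] = True
--         if any(word in q_lower for word in ["class", "object", "method", "inheritance", "polymorphism", "encapsulation"]):
--             question_types["oop"] = True
--         if any(word in q_lower for word in ["sql", "database", "table", "query", "select", "join"]):
--             question_types["sql"] = True
--         if any(word in q_lower for word in ["api", "endpoint", "request", "response", "http", "rest"]):
--             question_types["api"] = True
--         if any(word in q_lower for word in ["bug", "debug", "error", "fix", "issue"]):
--             question_types["debugging"] = True
--         if any(word in q_lower for word in ["logic", "condition", "if", "loop", "algorithm"]):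
--             question_types["logic"] = True
--         if any(word in q_lower for word in ["graph", "tree", "dynamic programming", "dp", "backtracking", "dijkstra", "bfs", "dfs"]):
--             question_types["dsa_pattern"] = True
--         if any(word in q_lower for word in ["project", "application", "system", "feature", "user", "real"]):
--             question_types["real_world"] = True
--
--     return question_types
-- ===== SOURCE B (Python) =====
-- from typing import List, Dict
--
-- TYPE_KEYWORDS = {
--     "array": ["array", "list", "index", "element"],
--     "string": ["string", "substring", "character", "text"],
--     "oop": ["class", "object", "method", "inheritance", "polymorphism", "encapsulation"],
--     "sql": ["sql", "database", "table", "query", "select", "join"],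
--     "api": ["api", "endpoint", "request", "response", "http", "rest"],
--     "debugging": ["bug", "debug", "error", "fix", "issue"],
--     "logic": ["logic", "condition", "if", "loop", "algorithm"],
--     "dsa_pattern": ["graph", "tree", "dynamic programming", "dp", "backtracking", "dijkstra", "bfs", "dfs"],
--     "real_world": ["project", "application", "system", "feature", "user", "real"],
-- }
--
-- def _get_question_types_asked(previous_questions: List[str]) -> Dict[str, bool]:
--     # Join all lowered questions into one corpus with a '\n' separator; since no
--     # keyword contains '\n' (and none is empty), a keyword occurs in the corpus
--     # iff it occurs in some question, so each keyword is searched exactly once.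
--     corpus = "\n".join(q.lower() for q in previous_questions)
--     return {cat: any(word in corpus for word in words) for cat, words in TYPE_KEYWORDS.items()}
-- ===== Notes on version B (the rewrite author's own statement) =====
-- stated objective: faster
-- what changed: Instead of testing every keyword against every question inside a loop that mutates a dict of flags, B joins all lowered questions into one newline-separated corpus and searches each keyword exactly once in that corpus (no keyword is empty or contains a newline, so it cannot span the separator).
import Mathlib
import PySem

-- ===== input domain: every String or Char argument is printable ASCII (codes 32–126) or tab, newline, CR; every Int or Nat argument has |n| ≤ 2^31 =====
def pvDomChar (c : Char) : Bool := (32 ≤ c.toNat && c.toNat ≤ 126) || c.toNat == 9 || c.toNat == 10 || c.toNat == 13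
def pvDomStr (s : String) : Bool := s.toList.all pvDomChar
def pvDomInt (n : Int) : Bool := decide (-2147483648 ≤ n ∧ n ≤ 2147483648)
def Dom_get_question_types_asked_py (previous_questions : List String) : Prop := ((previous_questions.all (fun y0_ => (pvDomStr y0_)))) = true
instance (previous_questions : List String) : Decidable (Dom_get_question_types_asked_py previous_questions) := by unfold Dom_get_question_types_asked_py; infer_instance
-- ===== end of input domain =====

-- B joins all lowered questions into one '\n'-separated corpus and searches each keyword once
-- in that corpus instead of once per question (objective: faster, measured; same value, same key order;
-- correct because no keyword is empty or contains '\n', so it cannot span the separator).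

-- ===== PORT A =====
-- the body of A's 'for q in previous_questions' loop, step for step
def pvStepA (question_types : PySem.Dict String Bool) (q : String) : PySem.Dict String Bool :=
    let q_lower := PySem.Str.lower q
    let question_types := if (["array", "list", "index", "element"]).any (fun word => PySem.Str.isIn word q_lower) then question_types.insert "array" true else question_types
    let question_types := if (["string", "substring", "character", "text"]).any (fun word => PySem.Str.isIn word q_lower) then question_types.insert "string" true else question_types
    let question_types := if (["class", "object", "method", "inheritance", "polymorphism", "encapsulation"]).any (fun word => PySem.Str.isIn word q_lower) then question_types.insert "oop" true else question_types
    let question_types := if (["sql", "database", "table", "query", "select", "join"]).any (fun word => PySem.Str.isIn word q_lower) then question_types.insert "sql" true else question_types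
    let question_types := if (["api", "endpoint", "request", "response", "http", "rest"]).any (fun word => PySem.Str.isIn word q_lower) then question_types.insert "api" true else question_types
    let question_types := if (["bug", "debug", "error", "fix", "issue"]).any (fun word => PySem.Str.isIn word q_lower) then question_types.insert "debugging" true else question_types
    let question_types := if (["logic", "condition", "if", "loop", "algorithm"]).any (fun word => PySem.Str.isIn word q_lower) then question_types.insert "logic" true else question_types
    let question_types := if (["graph", "tree", "dynamic programming", "dp", "backtracking", "dijkstra", "bfs", "dfs"]).any (fun word => PySem.Str.isIn word q_lower) then question_types.insert "dsa_pattern" true else question_types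
    let question_types := if (["project", "application", "system", "feature", "user", "real"]).any (fun word => PySem.Str.isIn word q_lower) then question_types.insert "real_world" true else question_types
    question_types

def get_question_types_asked_py (previous_questions : List String) : List (String × Bool) :=
  let question_types : PySem.Dict String Bool := PySem.Dict.ofList
    [("array", false), ("string", false), ("oop", false), ("sql", false), ("api", false), ("debugging", false), ("logic", false), ("dsa_pattern", false), ("real_world", false)]
  (previous_questions.foldl pvStepA question_types).items

-- ===== PORT B =====
def pvTable : List (String × List String) :=
  [("array", ["array", "list", "index", "element"]),
   ("string", ["string", "substring", "character", "text"]),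
   ("oop", ["class", "object", "method", "inheritance", "polymorphism", "encapsulation"]),
   ("sql", ["sql", "database", "table", "query", "select", "join"]),
   ("api", ["api", "endpoint", "request", "response", "http", "rest"]),
   ("debugging", ["bug", "debug", "error", "fix", "issue"]),
   ("logic", ["logic", "condition", "if", "loop", "algorithm"]),
   ("dsa_pattern", ["graph", "tree", "dynamic programming", "dp", "backtracking", "dijkstra", "bfs", "dfs"]),
   ("real_world", ["project", "application", "system", "feature", "user", "real"])]

def get_question_types_asked_py_alt (previous_questions : List String) : List (String × Bool) :=
  let corpus := PySem.Str.join "\n" (previous_questions.map PySem.Str.lower)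
  pvTable.map (fun cw => (cw.1, cw.2.any (fun word => PySem.Str.isIn word corpus)))

-- ===== PRECONDITION & SPEC =====
def Spec_get_question_types_asked_py (previous_questions : List String) (out : List (String × Bool)) : Prop := out = get_question_types_asked_py_alt previous_questions
instance (previous_questions : List String) (out : List (String × Bool)) : Decidable (Spec_get_question_types_asked_py previous_questions out) := by unfold Spec_get_question_types_asked_py; infer_instance

-- ===== CLAIM (what is proved, stated in full; the proofs are below) =====
def Claim_equal_get_question_types_asked_py : Prop := ∀ (previous_questions : List String), Dom_get_question_types_asked_py previous_questions → Spec_get_question_types_asked_py previous_questions (get_question_types_asked_py previous_questions)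

-- ===== LEMMAS AND PROOFS =====
lemma pvIns1 (b v1 v2 v3 v4 v5 v6 v7 v8 v9 : Bool) :
    (if b then (PySem.Dict.mk [("array", v1), ("string", v2), ("oop", v3), ("sql", v4), ("api", v5), ("debugging", v6), ("logic", v7), ("dsa_pattern", v8), ("real_world", v9)]).insert "array" true else PySem.Dict.mk [("array", v1), ("string", v2), ("oop", v3), ("sql", v4), ("api", v5), ("debugging", v6), ("logic", v7), ("dsa_pattern", v8), ("real_world", v9)]) = PySem.Dict.mk [("array", (v1 || b)), ("string", v2), ("oop", v3), ("sql", v4), ("api", v5), ("debugging", v6), ("logic", v7), ("dsa_pattern", v8), ("real_world", v9)] := by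
  cases b
  · simp
  · simp only [if_pos, Bool.or_true]; rfl

lemma pvIns2 (b v1 v2 v3 v4 v5 v6 v7 v8 v9 : Bool) :
    (if b then (PySem.Dict.mk [("array", v1), ("string", v2), ("oop", v3), ("sql", v4), ("api", v5), ("debugging", v6), ("logic", v7), ("dsa_pattern", v8), ("real_world", v9)]).insert "string" true else PySem.Dict.mk [("array", v1), ("string", v2), ("oop", v3), ("sql", v4), ("api", v5), ("debugging", v6), ("logic", v7), ("dsa_pattern", v8), ("real_world", v9)]) = PySem.Dict.mk [("array", v1), ("string", (v2 || b)), ("oop", v3), ("sql", v4), ("api", v5), ("debugging", v6), ("logic", v7), ("dsa_pattern", v8), ("real_world", v9)] := by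
  cases b
  · simp
  · simp only [if_pos, Bool.or_true]; rfl

lemma pvIns3 (b v1 v2 v3 v4 v5 v6 v7 v8 v9 : Bool) :
    (if b then (PySem.Dict.mk [("array", v1), ("string", v2), ("oop", v3), ("sql", v4), ("api", v5), ("debugging", v6), ("logic", v7), ("dsa_pattern", v8), ("real_world", v9)]).insert "oop" true else PySem.Dict.mk [("array", v1), ("string", v2), ("oop", v3), ("sql", v4), ("api", v5), ("debugging", v6), ("logic", v7), ("dsa_pattern", v8), ("real_world", v9)]) = PySem.Dict.mk [("array", v1), ("string", v2), ("oop", (v3 || b)), ("sql", v4), ("api", v5), ("debugging", v6), ("logic", v7), ("dsa_pattern", v8), ("real_world", v9)] := by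
  cases b
  · simp
  · simp only [if_pos, Bool.or_true]; rfl

lemma pvIns4 (b v1 v2 v3 v4 v5 v6 v7 v8 v9 : Bool) :
    (if b then (PySem.Dict.mk [("array", v1), ("string", v2), ("oop", v3), ("sql", v4), ("api", v5), ("debugging", v6), ("logic", v7), ("dsa_pattern", v8), ("real_world", v9)]).insert "sql" true else PySem.Dict.mk [("array", v1), ("string", v2), ("oop", v3), ("sql", v4), ("api", v5), ("debugging", v6), ("logic", v7), ("dsa_pattern", v8), ("real_world", v9)]) = PySem.Dict.mk [("array", v1), ("string", v2), ("oop", v3), ("sql", (v4 || b)), ("api", v5), ("debugging", v6), ("logic", v7), ("dsa_pattern", v8), ("real_world", v9)] := by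
  cases b
  · simp
  · simp only [if_pos, Bool.or_true]; rfl

lemma pvIns5 (b v1 v2 v3 v4 v5 v6 v7 v8 v9 : Bool) :
    (if b then (PySem.Dict.mk [("array", v1), ("string", v2), ("oop", v3), ("sql", v4), ("api", v5), ("debugging", v6), ("logic", v7), ("dsa_pattern", v8), ("real_world", v9)]).insert "api" true else PySem.Dict.mk [("array", v1), ("string", v2), ("oop", v3), ("sql", v4), ("api", v5), ("debugging", v6), ("logic", v7), ("dsa_pattern", v8), ("real_world", v9)]) = PySem.Dict.mk [("array", v1), ("string", v2), ("oop", v3), ("sql", v4), ("api", (v5 || b)), ("debugging", v6), ("logic", v7), ("dsa_pattern", v8), ("real_world", v9)] := by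
  cases b
  · simp
  · simp only [if_pos, Bool.or_true]; rfl

lemma pvIns6 (b v1 v2 v3 v4 v5 v6 v7 v8 v9 : Bool) :
    (if b then (PySem.Dict.mk [("array", v1), ("string", v2), ("oop", v3), ("sql", v4), ("api", v5), ("debugging", v6), ("logic", v7), ("dsa_pattern", v8), ("real_world", v9)]).insert "debugging" true else PySem.Dict.mk [("array", v1), ("string", v2), ("oop", v3), ("sql", v4), ("api", v5), ("debugging", v6), ("logic", v7), ("dsa_pattern", v8), ("real_world", v9)]) = PySem.Dict.mk [("array", v1), ("string", v2), ("oop", v3), ("sql", v4), ("api", v5), ("debugging", (v6 || b)), ("logic", v7), ("dsa_pattern", v8), ("real_world", v9)] := by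
  cases b
  · simp
  · simp only [if_pos, Bool.or_true]; rfl

lemma pvIns7 (b v1 v2 v3 v4 v5 v6 v7 v8 v9 : Bool) :
    (if b then (PySem.Dict.mk [("array", v1), ("string", v2), ("oop", v3), ("sql", v4), ("api", v5), ("debugging", v6), ("logic", v7), ("dsa_pattern", v8), ("real_world", v9)]).insert "logic" true else PySem.Dict.mk [("array", v1), ("string", v2), ("oop", v3), ("sql", v4), ("api", v5), ("debugging", v6), ("logic", v7), ("dsa_pattern", v8), ("real_world", v9)]) = PySem.Dict.mk [("array", v1), ("string", v2), ("oop", v3), ("sql", v4), ("api", v5), ("debugging", v6), ("logic", (v7 || b)), ("dsa_pattern", v8), ("real_world", v9)] := by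
  cases b
  · simp
  · simp only [if_pos, Bool.or_true]; rfl

lemma pvIns8 (b v1 v2 v3 v4 v5 v6 v7 v8 v9 : Bool) :
    (if b then (PySem.Dict.mk [("array", v1), ("string", v2), ("oop", v3), ("sql", v4), ("api", v5), ("debugging", v6), ("logic", v7), ("dsa_pattern", v8), ("real_world", v9)]).insert "dsa_pattern" true else PySem.Dict.mk [("array", v1), ("string", v2), ("oop", v3), ("sql", v4), ("api", v5), ("debugging", v6), ("logic", v7), ("dsa_pattern", v8), ("real_world", v9)]) = PySem.Dict.mk [("array", v1), ("string", v2), ("oop", v3), ("sql", v4), ("api", v5), ("debugging", v6), ("logic", v7), ("dsa_pattern", (v8 || b)), ("real_world", v9)] := by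
  cases b
  · simp
  · simp only [if_pos, Bool.or_true]; rfl

lemma pvIns9 (b v1 v2 v3 v4 v5 v6 v7 v8 v9 : Bool) :
    (if b then (PySem.Dict.mk [("array", v1), ("string", v2), ("oop", v3), ("sql", v4), ("api", v5), ("debugging", v6), ("logic", v7), ("dsa_pattern", v8), ("real_world", v9)]).insert "real_world" true else PySem.Dict.mk [("array", v1), ("string", v2), ("oop", v3), ("sql", v4), ("api", v5), ("debugging", v6), ("logic", v7), ("dsa_pattern", v8), ("real_world", v9)]) = PySem.Dict.mk [("array", v1), ("string", v2), ("oop", v3), ("sql", v4), ("api", v5), ("debugging", v6), ("logic", v7), ("dsa_pattern", v8), ("real_world", (v9 || b))] := by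
  cases b
  · simp
  · simp only [if_pos, Bool.or_true]; rfl

lemma pvStepA_mk (q : String) (v1 v2 v3 v4 v5 v6 v7 v8 v9 : Bool) :
    pvStepA (PySem.Dict.mk [("array", v1), ("string", v2), ("oop", v3), ("sql", v4), ("api", v5), ("debugging", v6), ("logic", v7), ("dsa_pattern", v8), ("real_world", v9)]) q = PySem.Dict.mk [("array", (v1 || (["array", "list", "index", "element"]).any (fun word => PySem.Str.isIn word (PySem.Str.lower q)))), ("string", (v2 || (["string", "substring", "character", "text"]).any (fun word => PySem.Str.isIn word (PySem.Str.lower q)))), ("oop", (v3 || (["class", "object", "method", "inheritance", "polymorphism", "encapsulation"]).any (fun word => PySem.Str.isIn word (PySem.Str.lower q)))), ("sql", (v4 || (["sql", "database", "table", "query", "select", "join"]).any (fun word => PySem.Str.isIn word (PySem.Str.lower q)))), ("api", (v5 || (["api", "endpoint", "request", "response", "http", "rest"]).any (fun word => PySem.Str.isIn word (PySem.Str.lower q)))), ("debugging", (v6 || (["bug", "debug", "error", "fix", "issue"]).any (fun word => PySem.Str.isIn word (PySem.Str.lower q)))), ("logic", (v7 || (["logic", "condition", "if", "loop", "algorithm"]).any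 (fun word => PySem.Str.isIn word (PySem.Str.lower q)))), ("dsa_pattern", (v8 || (["graph", "tree", "dynamic programming", "dp", "backtracking", "dijkstra", "bfs", "dfs"]).any (fun word => PySem.Str.isIn word (PySem.Str.lower q)))), ("real_world", (v9 || (["project", "application", "system", "feature", "user", "real"]).any (fun word => PySem.Str.isIn word (PySem.Str.lower q))))] := by
  unfold pvStepA
  simp only [pvIns1, pvIns2, pvIns3, pvIns4, pvIns5, pvIns6, pvIns7, pvIns8, pvIns9]

lemma pvFoldA_items (previous_questions : List String) : ∀ (v1 v2 v3 v4 v5 v6 v7 v8 v9 : Bool),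
    (previous_questions.foldl pvStepA (PySem.Dict.mk [("array", v1), ("string", v2), ("oop", v3), ("sql", v4), ("api", v5), ("debugging", v6), ("logic", v7), ("dsa_pattern", v8), ("real_world", v9)])).items =
    [("array", (v1 || previous_questions.any (fun q => (["array", "list", "index", "element"]).any (fun word => PySem.Str.isIn word (PySem.Str.lower q))))), ("string", (v2 || previous_questions.any (fun q => (["string", "substring", "character", "text"]).any (fun word => PySem.Str.isIn word (PySem.Str.lower q))))), ("oop", (v3 || previous_questions.any (fun q => (["class", "object", "method", "inheritance", "polymorphism", "encapsulation"]).any (fun word => PySem.Str.isIn word (PySem.Str.lower q))))), ("sql", (v4 || previous_questions.any (fun q => (["sql", "database", "table", "query", "select", "join"]).any (fun word => PySem.Str.isIn word (PySem.Str.lower q))))), ("api", (v5 || previous_questions.any (fun q => (["api", "endpoint", "request", "response", "http", "rest"]).any (fun word => PySem.Str.isIn word (PySem.Str.lower q))))), ("debugging", (v6 || previous_questions.any (fun q => (["bug", "debug", "error", "fix", "issue"]).any (fun word => PySem.Str.isIn word (PySem.Str.lower q))))), ("logic", (v7 || previous_questions.any (fun q => (["logic", "condition", "if", "loop", "algorithm"]).any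 (fun word => PySem.Str.isIn word (PySem.Str.lower q))))), ("dsa_pattern", (v8 || previous_questions.any (fun q => (["graph", "tree", "dynamic programming", "dp", "backtracking", "dijkstra", "bfs", "dfs"]).any (fun word => PySem.Str.isIn word (PySem.Str.lower q))))), ("real_world", (v9 || previous_questions.any (fun q => (["project", "application", "system", "feature", "user", "real"]).any (fun word => PySem.Str.isIn word (PySem.Str.lower q)))))] := by
  induction previous_questions with
  | nil => intro v1 v2 v3 v4 v5 v6 v7 v8 v9; simp
  | cons q qs ih =>
      intro v1 v2 v3 v4 v5 v6 v7 v8 v9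
      simp only [List.foldl_cons, pvStepA_mk, ih, List.any_cons, Bool.or_assoc]

-- a prefix of l₁ ++ c :: l₂ that avoids c is a prefix of l₁
lemma pvPrefixSplit {w l₁ l₂ : List Char} {c : Char} (hc : c ∉ w)
    (hp : w <+: l₁ ++ c :: l₂) : w <+: l₁ := by
  by_cases h : w.length ≤ l₁.length
  · have hw : w = List.take w.length l₁ := by
      have ht := List.prefix_iff_eq_take.mp hp
      rw [List.take_append, Nat.sub_eq_zero_of_le h, List.take_zero, List.append_nil] at ht
      exact ht
    rw [hw]
    exact List.take_prefix _ _
  · exfalso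
    have h' : l₁.length < w.length := by omega
    have hcw : w[l₁.length]'h' = (l₁ ++ c :: l₂)[l₁.length]'(by simp) := hp.getElem h'
    have hval : (l₁ ++ c :: l₂)[l₁.length]'(by simp) = c := by
      rw [List.getElem_append_right (Nat.le_refl l₁.length)]
      simp
    exact hc ((hcw.trans hval) ▸ List.getElem_mem h')

-- an infix avoiding the separator c lies entirely on one side of it
lemma pvInfixSplit {w : List Char} {c : Char} (hc : c ∉ w) :
    ∀ (l₁ l₂ : List Char), w <:+: l₁ ++ c :: l₂ ↔ w <:+: l₁ ∨ w <:+: l₂ := by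
  intro l₁
  induction l₁ with
  | nil =>
      intro l₂
      constructor
      · intro h
        rcases List.infix_cons_iff.mp h with hp | hs
        · exact Or.inl (pvPrefixSplit hc (l₁ := []) hp).isInfix
        · exact Or.inr hs
      · rintro (h | h)
        · rw [List.infix_nil.mp h]
          exact List.nil_infix
        · exact List.infix_cons h
      | cons a l₁' ih =>
      intro l₂
      constructor
      · intro h
        rcases List.infix_cons_iff.mp h with hp | hs
        · exact Or.inl (pvPrefixSplit hc (l₁ := a :: l₁') hp).isInfix
        · rcases (ih l₂).mp hs with h1 | h2
          · exact Or.inl (List.infix_cons h1)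
          · exact Or.inr h2
      · rintro (h | h)
        · exact h.trans List.infix_append_left
        · refine h.trans ?_
          rw [show (a :: l₁') ++ c :: l₂ = ((a :: l₁') ++ [c]) ++ l₂ by simp]
          exact List.infix_append_right

-- a nonempty newline-free word occurs in the joined corpus iff it occurs in some part
lemma pvIsInJoin {w : List Char} (hne : w ≠ []) (hc : ('\n' : Char) ∉ w) :
    ∀ parts : List (List Char),
      PySem.Chars.isIn w (PySem.Chars.join ['\n'] parts) = parts.any (fun p => PySem.Chars.isIn w p) := by
  intro parts
  induction parts with
  | nil =>
      rw [PySem.Chars.join_nil, List.any_nil]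
      exact (PySem.Chars.isIn_eq_false_iff _ _).mpr (fun h => hne (List.infix_nil.mp h))
  | cons p rest ih =>
      cases rest with
      | nil => rw [PySem.Chars.join_singleton]; simp
      | cons q ps =>
          rw [PySem.Chars.join_cons_cons, List.append_assoc, List.singleton_append,
            Bool.eq_iff_iff, PySem.Chars.isIn_iff_infix, pvInfixSplit hc,
            List.any_cons, Bool.or_eq_true, ← ih,
            ← PySem.Chars.isIn_iff_infix w p, ← PySem.Chars.isIn_iff_infix w (PySem.Chars.join ['\n'] (q :: ps))]

lemma pvStrIsInJoin (w : String) (hne : w.toList ≠ []) (hc : ('\n' : Char) ∉ w.toList)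
    (parts : List String) :
    PySem.Str.isIn w (PySem.Str.join "\n" parts) = parts.any (fun p => PySem.Str.isIn w p) := by
  rw [PySem.Str.isIn_eq, PySem.Str.toList_join,
    show ("\n" : String).toList = ['\n'] from rfl, pvIsInJoin hne hc, List.any_map]
  simp [Function.comp_def, PySem.Str.isIn_eq]

-- swap the keyword and corpus loops: any keyword in the joined corpus ↔ some part matches some keyword
lemma pvAnyWordsJoin (words : List String)
    (h : ∀ w ∈ words, w.toList ≠ [] ∧ ('\n' : Char) ∉ w.toList) (parts : List String) :
    words.any (fun w => PySem.Str.isIn w (PySem.Str.join "\n" parts)) =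
      parts.any (fun p => words.any (fun w => PySem.Str.isIn w p)) := by
  rw [Bool.eq_iff_iff]
  simp only [List.any_eq_true]
  constructor
  · rintro ⟨w, hw, hIn⟩
    rw [pvStrIsInJoin w (h w hw).1 (h w hw).2] at hIn
    obtain ⟨p, hp, h2⟩ := List.any_eq_true.mp hIn
    exact ⟨p, hp, w, hw, h2⟩
  · rintro ⟨p, hp, w, hw, h2⟩
    exact ⟨w, hw, by
      rw [pvStrIsInJoin w (h w hw).1 (h w hw).2]
      exact List.any_eq_true.mpr ⟨p, hp, h2⟩⟩

-- ===== VERDICT (by name: the statement is the Claim_ definition above) =====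
set_option maxHeartbeats 1000000 in
theorem get_question_types_asked_py_spec : Claim_equal_get_question_types_asked_py := by
  intro previous_questions _
  unfold Spec_get_question_types_asked_py get_question_types_asked_py get_question_types_asked_py_alt pvTable
  rw [show (PySem.Dict.ofList [("array", false), ("string", false), ("oop", false), ("sql", false), ("api", false), ("debugging", false), ("logic", false), ("dsa_pattern", false), ("real_world", false)] : PySem.Dict String Bool) = PySem.Dict.mk [("array", false), ("string", false), ("oop", false), ("sql", false), ("api", false), ("debugging", false), ("logic", false), ("dsa_pattern", false), ("real_world", false)] from rfl]
  rw [pvFoldA_items]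
  simp only [List.map_cons, List.map_nil, Bool.false_or]
  rw [pvAnyWordsJoin ["array", "list", "index", "element"] (by decide),
      pvAnyWordsJoin ["string", "substring", "character", "text"] (by decide),
      pvAnyWordsJoin ["class", "object", "method", "inheritance", "polymorphism", "encapsulation"] (by decide),
      pvAnyWordsJoin ["sql", "database", "table", "query", "select", "join"] (by decide),
      pvAnyWordsJoin ["api", "endpoint", "request", "response", "http", "rest"] (by decide),
      pvAnyWordsJoin ["bug", "debug", "error", "fix", "issue"] (by decide),
      pvAnyWordsJoin ["logic", "condition", "if", "loop", "algorithm"] (by decide),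
      pvAnyWordsJoin ["graph", "tree", "dynamic programming", "dp", "backtracking", "dijkstra", "bfs", "dfs"] (by decide),
      pvAnyWordsJoin ["project", "application", "system", "feature", "user", "real"] (by decide)]
  simp only [List.any_map, Function.comp_def]
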